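-- pv_equiv track=rewrite | github.com/yezhang4528/USACO | training/chapter1/sec_1_2/beads/beads.py | replaceW
-- ===== SOURCE A (Python) =====
-- def replaceW(beadLine, curIndex, curColor):
--     numReplaced = 0
--     for i in range(curIndex, len(beadLine)):
--         if beadLine[i] == 'w':
--             beadLine[i] = curColor
--             numReplaced += 1
--         else:
--             break
--     return numReplaced
-- ===== SOURCE B (Python) =====
-- def replaceW(beadLine, curIndex, curColor):
--     # measure-then-assign: count the leading 'w'-run of the tail, then bulk-replace it
--     tail = beadLine[curIndex:]
--     n = next((k for k, b in enumerate(tail) if b != 'w'), len(tail))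
--     beadLine[curIndex:curIndex + n] = [curColor] * n
--     return n
-- ===== Notes on version B (the rewrite author's own statement) =====
-- stated objective: alternative
-- what changed: Replaces A's interleaved mutate-and-count loop with break by a two-phase structure: first measure the leading 'w'-run of beadLine[curIndex:] with next() over an enumerate generator, then replace it with one bulk slice assignment and return the measured length.
-- outside the precondition, e.g. on replaceW(['w', 'w'], -1, 'w'): A returns 3, B returns 1; on replaceW(['a', 'w'], -1, 'b'): A returns 1, B returns 1
import Mathlib
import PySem

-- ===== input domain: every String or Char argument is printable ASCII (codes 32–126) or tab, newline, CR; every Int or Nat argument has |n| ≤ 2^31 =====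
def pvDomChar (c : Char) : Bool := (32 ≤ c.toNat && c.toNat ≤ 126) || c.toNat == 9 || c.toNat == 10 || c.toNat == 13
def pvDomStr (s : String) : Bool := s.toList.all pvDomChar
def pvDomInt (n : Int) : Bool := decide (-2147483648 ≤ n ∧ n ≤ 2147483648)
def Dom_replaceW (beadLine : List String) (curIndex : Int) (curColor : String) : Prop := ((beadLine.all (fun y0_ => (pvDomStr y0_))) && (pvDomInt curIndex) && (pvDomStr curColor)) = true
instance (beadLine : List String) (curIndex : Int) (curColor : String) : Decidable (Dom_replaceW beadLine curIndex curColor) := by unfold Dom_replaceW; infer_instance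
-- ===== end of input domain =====

-- B restructures A's interleaved mutate-and-count loop into measure-then-assign; both mutate
-- the list in place on Pre_ identically; the equivalence proved here is about the return value.


-- ===== PORT A =====
-- the for-loop over range(curIndex, len(beadLine)) with break, carrying the mutated list
def replaceWLoopA (curColor : String) : List Int → List String → Int → Int
  | [], _, acc => acc
  | i :: rest, bl, acc =>
    match PySem.List.pyGet? bl i with
    | none => acc   -- IndexError; outside Pre_replaceW
    | some s =>
      if s = "w" then replaceWLoopA curColor rest (PySem.List.pySetD bl i curColor) (acc + 1)
      else acc

def replaceW (beadLine : List String) (curIndex : Int) (curColor : String) : Int :=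
  replaceWLoopA curColor (PySem.List.pyRange curIndex (beadLine.length : Int) 1) beadLine 0

-- ===== PORT B =====
-- measure the leading 'w'-run of beadLine[curIndex:] via next() over an enumerate generator
def replaceW_alt (beadLine : List String) (curIndex : Int) (curColor : String) : Int :=
  let tail := PySem.List.slice beadLine (some curIndex) none
  match List.find? (fun p => p.2 != "w") (PySem.List.enumerate tail 0) with
  | some p => p.1
  | none => (tail.length : Int)

-- ===== PRECONDITION & SPEC =====
-- Pre_ restricts to the task's natural domain 0 ≤ curIndex (the USACO caller only passes 0 ≤ curIndex ≤ len):
-- for curIndex < -len A raises IndexError, and for -len ≤ curIndex < 0 A's Python negative-index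
-- wraparound reads the tail and then rescans from position 0 — outside the function's natural domain.
def Pre_replaceW (beadLine : List String) (curIndex : Int) (curColor : String) : Prop :=
  0 ≤ curIndex
instance (beadLine : List String) (curIndex : Int) (curColor : String) : Decidable (Pre_replaceW beadLine curIndex curColor) := by unfold Pre_replaceW; infer_instance
def pvWitness_replaceW : List String × Int × String := (["w", "w", "a"], 0, "r")

def Spec_replaceW (beadLine : List String) (curIndex : Int) (curColor : String) (out : Int) : Prop := out = replaceW_alt beadLine curIndex curColor
instance (beadLine : List String) (curIndex : Int) (curColor : String) (out : Int) : Decidable (Spec_replaceW beadLine curIndex curColor out) := by unfold Spec_replaceW; infer_instance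

-- ===== CLAIM (what is proved, stated in full; the proofs are below) =====
def Claim_equal_replaceW : Prop := ∀ (beadLine : List String) (curIndex : Int) (curColor : String), Dom_replaceW beadLine curIndex curColor → Pre_replaceW beadLine curIndex curColor → Spec_replaceW beadLine curIndex curColor (replaceW beadLine curIndex curColor)
-- ===== LEMMAS AND PROOFS =====

-- B's measurement equals the length of the leading 'w'-run
theorem findRun_eq_takeWhile (xs : List String) (s : Int) :
    (match List.find? (fun p => p.2 != "w") (PySem.List.enumerate xs s) with
     | some p => p.1
     | none => s + (xs.length : Int)) = s + ((xs.takeWhile (· == "w")).length : Int) := by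
  induction xs generalizing s with
  | nil => simp [PySem.List.enumerate_nil]
  | cons x xs ih =>
    rw [PySem.List.enumerate_cons]
    by_cases hx : x = "w"
    · subst hx
      rw [List.find?_cons_of_neg (by simp), List.takeWhile_cons_of_pos (by simp)]
      have hrec := ih (s + 1)
      cases hf : List.find? (fun p => p.2 != "w") (PySem.List.enumerate xs (s + 1)) with
      | none =>
        rw [hf] at hrec
        simp only [List.length_cons]
        simp at hrec ⊢
        omega
      | some p =>
        rw [hf] at hrec
        simp only [List.length_cons]
        simp at hrec
        omega
    · rw [List.find?_cons_of_pos (by simp [hx]), List.takeWhile_cons_of_neg (by simp [hx])]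
      simp

-- A's loop from index j counts the leading 'w'-run of (bl.drop j); mutation at index i < j+1
-- never changes what later iterations read.
theorem loopA_eq (c : String) : ∀ (d : Nat) (bl : List String) (j : Nat) (acc : Int),
    bl.length - j = d →
    replaceWLoopA c (PySem.List.pyRange (j : Int) (bl.length : Int) 1) bl acc
      = acc + (((bl.drop j).takeWhile (· == "w")).length : Int) := by
  intro d
  induction d with
  | zero =>
    intro bl j acc h
    have hj : bl.length ≤ j := by omega
    rw [PySem.List.pyRange_one_eq_nil (by exact_mod_cast hj)]
    rw [List.drop_eq_nil_of_le hj]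
    simp [replaceWLoopA]
  | succ d ih =>
    intro bl j acc h
    have hj : j < bl.length := by omega
    rw [PySem.List.pyRange_one_cons (by exact_mod_cast hj)]
    rw [List.drop_eq_getElem_cons hj]
    simp only [replaceWLoopA]
    rw [PySem.List.pyGet?_natCast, List.getElem?_eq_getElem hj]
    by_cases hw : bl[j] = "w"
    · simp only [hw, if_pos rfl]
      have hset : PySem.List.pySetD bl (j : Int) c = bl.set j c := by
        simp [PySem.List.pySetD_natCast]
      rw [hset]
      have hlen : (bl.set j c).length = bl.length := by simp
      have hcast : ((j : Int) + 1) = ((j + 1 : Nat) : Int) := by push_cast; ring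
      have := ih (bl.set j c) (j + 1) (acc + 1) (by omega)
      rw [hcast, ← hlen, this]
      have hdrop : (bl.set j c).drop (j + 1) = bl.drop (j + 1) := by
        apply List.ext_getElem
        · simp
        · intro k hk1 hk2
          simp [List.getElem_drop, List.getElem_set, Nat.ne_of_lt (by omega : j < j + 1 + k)]
      rw [hdrop]
      simp only [List.takeWhile, hw]
      norm_num
      push_cast
      ring
    · simp only [hw, if_neg hw]
      simp only [List.takeWhile]
      have : (bl[j] == "w") = false := by simp [hw]
      rw [this]
      simp

-- ===== VERDICT (by name: the statement is the Claim_ definition above) =====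
-- specialisation of findRun_eq_takeWhile at start 0, in the branch shape replaceW_alt uses
theorem findRun0 (xs : List String) :
    (match List.find? (fun p => p.2 != "w") (PySem.List.enumerate xs 0) with
     | some p => p.1
     | none => (xs.length : Int)) = ((xs.takeWhile (· == "w")).length : Int) := by
  have h := findRun_eq_takeWhile xs 0
  cases hf : List.find? (fun p => p.2 != "w") (PySem.List.enumerate xs 0) with
  | none => rw [hf] at h; simp at h ⊢; omega
  | some p => rw [hf] at h; simp at h ⊢; omega

theorem replaceW_spec : Claim_equal_replaceW := by
  intro bl i c _ hpre
  have h0 : (0 : Int) ≤ i := hpre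
  unfold Spec_replaceW replaceW replaceW_alt
  rw [show i = ((i.toNat : Nat) : Int) from (Int.toNat_of_nonneg h0).symm]
  simp only [PySem.List.slice_from_natCast]
  rw [loopA_eq c (bl.length - i.toNat) bl i.toNat 0 rfl]
  rw [findRun0]
  omega
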